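-- pv_equiv track=rewrite | github.com/anikagupte/competitive-programming | british-informatics-olympiad/bio_2021.py | is_pat
-- ===== SOURCE A (Python) =====
-- def is_pat(input_pat):
--     if len(input_pat) == 1: return 'YES'
--     for i in range(len(input_pat)):
--         temp1 = input_pat[:i]
--         temp2 = input_pat[i:]
--         if temp1 and temp2:
--             if min(temp1) > max(temp2) and is_pat(temp1[::-1]) and is_pat(temp2[::-1]):
--                 return 'YES'
--     return 'NO'
-- ===== SOURCE B (Python) =====
-- # In A, the recursive calls are vacuous: both 'YES' and 'NO' are truthy strings,
-- # so A returns 'YES' exactly when the list is a singleton or some split has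
-- # min(prefix) > max(suffix).  B computes that directly in one linear pass with a
-- # suffix-maximum table and a running prefix minimum, instead of A's recursion
-- # with per-split min()/max() rescans and slicing.
-- def is_pat(input_pat):
--     n = len(input_pat)
--     if n == 1:
--         return 'YES'
--     if n == 0:
--         return 'NO'
--     suf = []
--     m = input_pat[-1]
--     for x in reversed(input_pat):
--         m = x if x > m else m
--         suf.append(m)
--     suf.reverse()
--     pm = input_pat[0]
--     for x, s in zip(input_pat[1:], suf[1:]):
--         if pm > s:
--             return 'YES'
--         pm = x if x < pm else pm
--     return 'NO'
-- ===== Notes on version B (the rewrite author's own statement) =====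
-- stated objective: faster
-- what changed: A's recursion is vacuous (its recursive 'YES'/'NO' results are both truthy Python strings), so B drops it and computes the same answer in one linear pass with a suffix-maximum table and a running prefix minimum, instead of A's recursion over every valid split with per-split min()/max() rescans and slicing.
import Mathlib
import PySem

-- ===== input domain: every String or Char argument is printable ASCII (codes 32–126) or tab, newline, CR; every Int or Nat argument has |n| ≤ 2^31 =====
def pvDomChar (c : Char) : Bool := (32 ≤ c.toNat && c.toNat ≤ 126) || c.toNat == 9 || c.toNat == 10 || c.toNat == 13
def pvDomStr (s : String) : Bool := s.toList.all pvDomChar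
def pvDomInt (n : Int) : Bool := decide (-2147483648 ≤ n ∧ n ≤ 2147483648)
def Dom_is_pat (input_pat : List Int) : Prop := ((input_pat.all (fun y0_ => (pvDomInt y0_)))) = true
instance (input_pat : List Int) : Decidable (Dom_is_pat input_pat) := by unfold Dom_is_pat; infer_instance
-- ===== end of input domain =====

-- B replaces A's recursion (whose recursive results 'YES'/'NO' are both truthy Python
-- strings, so they never affect A's answer) and per-split min()/max() rescans by one
-- linear pass: a suffix-maximum table and a running prefix minimum.

-- ===== PORT A =====
-- 'min(temp1)' / 'max(temp2)' are ported as (min?/max? ...).getD 0; the guard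
-- 'if temp1 and temp2' makes both lists nonempty, so the default is never used.
-- The Nat argument of is_patF is fuel that totalizes the recursion; is_pat passes
-- fuel = length, which is always enough, so is_patF computes exactly the Python
-- recursion.  Python's truthiness of the recursive string results is ported as ≠ "".
def is_patF : Nat → List Int → String
  | 0, _ => "NO"  -- unreachable for fuel ≥ length
  | f + 1, input_pat =>
    if input_pat.length = 1 then "YES"
    else if (PySem.List.pyRange 0 input_pat.length 1).any (fun i =>
        let temp1 := PySem.List.slice input_pat none (some i)
        let temp2 := PySem.List.slice input_pat (some i) none
        if temp1 ≠ [] ∧ temp2 ≠ [] then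
          decide ((PySem.List.min? temp1 (fun x => x)).getD 0 > (PySem.List.max? temp2 (fun x => x)).getD 0)
            && decide (is_patF f temp1.reverse ≠ "") && decide (is_patF f temp2.reverse ≠ "")
        else false)
    then "YES" else "NO"

def is_pat (input_pat : List Int) : String := is_patF input_pat.length input_pat

-- ===== PORT B =====
-- 'm = x if x > m else m; suf.append(m)' running-maximum loop over reversed(input_pat)
def smLoop (m : Int) : List Int → List Int
  | [] => []
  | x :: xs => (if x > m then x else m) :: smLoop (if x > m then x else m) xs

-- 'for x, s in zip(input_pat[1:], suf[1:]): if pm > s: return YES; pm = x if x < pm else pm'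
def scanLoop : Int → List (Int × Int) → Bool
  | _, [] => false
  | pm, (x, s) :: rest => if pm > s then true else scanLoop (if x < pm then x else pm) rest

def is_pat_alt (input_pat : List Int) : String :=
  if input_pat.length = 1 then "YES"
  else if input_pat.length = 0 then "NO"
  else
    let suf := (smLoop (PySem.List.pyGetD input_pat (-1) 0) input_pat.reverse).reverse
    if scanLoop (PySem.List.pyGetD input_pat 0 0)
        ((PySem.List.slice input_pat (some 1) none).zip (PySem.List.slice suf (some 1) none))
    then "YES" else "NO"

-- ===== PRECONDITION & SPEC =====
def Spec_is_pat (input_pat : List Int) (out : String) : Prop := out = is_pat_alt input_pat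
instance (input_pat : List Int) (out : String) : Decidable (Spec_is_pat input_pat out) := by unfold Spec_is_pat; infer_instance

-- ===== CLAIM (what is proved, stated in full; the proofs are below) =====
def Claim_equal_is_pat : Prop := ∀ (input_pat : List Int), Dom_is_pat input_pat → Spec_is_pat input_pat (is_pat input_pat)

-- ===== LEMMAS AND PROOFS =====

theorem is_patF_ne_empty (f : Nat) (l : List Int) : is_patF f l ≠ "" := by
  cases f with
  | zero => simp [is_patF]
  | succ f => rw [is_patF]; split <;> [simp; skip]; split <;> simp

-- splitCond l k: every element of l[:k] is greater than every element of l[k:]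
def splitCond (l : List Int) (k : Nat) : Bool :=
  match l.take k, l.drop k with
  | a :: as, b :: bs => decide (as.foldl min a > bs.foldl max b)
  | _, _ => false

def hasSplit (l : List Int) : Bool :=
  (List.range l.length).any (splitCond l)

-- ---- helper lemmas about the running-max loop and fold extrema ----
lemma if_lt_eq_min (x m : Int) : (if x < m then x else m) = min m x := by
  by_cases h : x < m
  · simp [h, min_eq_right h.le]
  · simp [h, min_eq_left (by omega : m ≤ x)]

lemma if_gt_eq_max (x m : Int) : (if x > m then x else m) = max m x := by
  by_cases h : x > m
  · simp [h, max_eq_right h.le]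
  · simp [h, max_eq_left (by omega : x ≤ m)]

lemma length_smLoop (xs : List Int) : ∀ m, (smLoop m xs).length = xs.length := by
  induction xs with
  | nil => intro m; rfl
  | cons x xs ih => intro m; simp [smLoop, ih]

lemma smLoop_getD (xs : List Int) : ∀ (m : Int) (k : Nat), k < xs.length →
    (smLoop m xs).getD k 0 = (xs.take (k+1)).foldl max m := by
  induction xs with
  | nil => intro m k h; simp at h
  | cons x xs ih =>
    intro m k h
    cases k with
    | zero => simp [smLoop, if_gt_eq_max]
    | succ k =>
      simp only [smLoop, if_gt_eq_max, List.getD_cons_succ, List.take_succ_cons, List.foldl_cons]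
      exact ih (max m x) k (by simpa using h)

lemma foldl_max_out (xs : List Int) : ∀ (m b : Int), xs.foldl max (max m b) = max m (xs.foldl max b) := by
  induction xs with
  | nil => intro m b; rfl
  | cons x xs ih =>
    intro m b
    simp only [List.foldl_cons]
    rw [max_assoc, ih]

lemma foldl_max_reverse (xs : List Int) : ∀ m, xs.reverse.foldl max m = xs.foldl max m := by
  induction xs with
  | nil => intro m; rfl
  | cons x xs ih =>
    intro m
    simp only [List.reverse_cons, List.foldl_append, List.foldl_cons, List.foldl_nil, ih]
    rw [max_comm m x, foldl_max_out, max_comm]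

lemma foldl_max_absorb (b : Int) (bs : List Int) (g : Int) (hg : g ∈ b :: bs) :
    (b :: bs).foldl max g = bs.foldl max b := by
  simp only [List.foldl_cons]
  have : bs.foldl max (max g b) = max g (bs.foldl max b) := foldl_max_out bs g b
  rw [this]
  rcases List.mem_cons.1 hg with h | h
  · subst h; exact max_eq_right (PySem.List.le_foldl_max bs g).1
  · exact max_eq_right ((PySem.List.le_foldl_max bs b).2 g h)

lemma getLast_drop_eq (l : List Int) (k : Nat) (hne : l ≠ []) (hd : l.drop k ≠ []) :
    (l.drop k).getLast hd = l.getLast hne := by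
  have hkl : k < l.length := by
    by_contra h
    exact hd (List.drop_eq_nil_iff.2 (by omega))
  rw [List.getLast_eq_getElem, List.getLast_eq_getElem, List.getElem_drop]
  congr 1
  simp [List.length_drop]
  omega

-- suf[k] (for 0 ≤ k < len) is the maximum of l.drop k
lemma sm_at (l : List Int) (k : Nat) (h2 : k < l.length) (b : Int) (bs : List Int)
    (hdk : l.drop k = b :: bs) :
    ((smLoop (PySem.List.pyGetD l (-1) 0) l.reverse).reverse).getD k 0 = bs.foldl max b := by
  have hne : l ≠ [] := by intro h; rw [h] at h2; simp at h2
  rw [PySem.List.pyGetD_neg_one l 0 hne]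
  have hlenR : (smLoop (l.getLast hne) l.reverse).length = l.length := by
    rw [length_smLoop]; simp
  have hk : k < (smLoop (l.getLast hne) l.reverse).reverse.length := by
    simp [hlenR]; omega
  rw [List.getD_eq_getElem _ _ hk, List.getElem_reverse]
  rw [← List.getD_eq_getElem _ (0 : Int) (by rw [hlenR]; omega)]
  rw [smLoop_getD _ _ _ (by simp only [List.length_reverse]; rw [hlenR]; omega)]
  have hfix : (smLoop (l.getLast hne) l.reverse).length - 1 - k + 1 = l.length - k := by
    rw [hlenR]; omega
  rw [hfix, List.take_reverse]
  have : l.length - (l.length - k) = k := by omega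
  rw [this, foldl_max_reverse, hdk]
  apply foldl_max_absorb
  have hmem : l.getLast hne ∈ List.drop k l := by
    rw [← getLast_drop_eq l k hne (by rw [hdk]; simp)]
    exact List.getLast_mem _
  rw [hdk] at hmem
  exact hmem

lemma take_drop_cons (l : List Int) (k : Nat) (h1 : 0 < k) (h2 : k < l.length) :
    (∃ a as, l.take k = a :: as) ∧ (∃ b bs, l.drop k = b :: bs) := by
  constructor
  · cases htk : l.take k with
    | nil => rw [List.take_eq_nil_iff] at htk; rcases htk with h | h; · omega
             · rw [h] at h2; simp at h2
    | cons a as => exact ⟨a, as, rfl⟩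
  · cases hdk : l.drop k with
    | nil => rw [List.drop_eq_nil_iff] at hdk; omega
    | cons b bs => exact ⟨b, bs, rfl⟩

-- ---- A-side characterization ----
-- A's loop body at fuel f (zeta/beta-expanded); defeq to the lambda inside is_patF (f+1).
def bodyAF (f : Nat) (l : List Int) (i : Int) : Bool :=
  let temp1 := PySem.List.slice l none (some i)
  let temp2 := PySem.List.slice l (some i) none
  if temp1 ≠ [] ∧ temp2 ≠ [] then
    decide ((PySem.List.min? temp1 (fun x => x)).getD 0 > (PySem.List.max? temp2 (fun x => x)).getD 0)
      && decide (is_patF f temp1.reverse ≠ "") && decide (is_patF f temp2.reverse ≠ "")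
  else false

lemma bodyAF_eq (f : Nat) (l : List Int) (i : Int) (h0 : 0 ≤ i) (hlt : i < (l.length : Int)) :
    bodyAF f l i = splitCond l i.toNat := by
  unfold bodyAF
  simp only [PySem.List.slice_to l h0, PySem.List.slice_from l h0]
  by_cases hz : i.toNat = 0
  · rw [hz]
    rw [if_neg (by simp)]
    unfold splitCond
    simp
  · have h2 : i.toNat < l.length := by omega
    obtain ⟨⟨a, as, htk⟩, ⟨b, bs, hdk⟩⟩ := take_drop_cons l i.toNat (by omega) h2
    rw [if_pos ⟨by rw [htk]; simp, by rw [hdk]; simp⟩]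
    rw [htk, hdk, PySem.List.min?_id_cons, PySem.List.max?_id_cons]
    unfold splitCond
    rw [htk, hdk]
    simp [is_patF_ne_empty]

theorem is_patF_eq_ite (f : Nat) (l : List Int) (hf : l.length ≤ f) :
    is_patF f l = if (l.length = 1 ∨ hasSplit l = true) then "YES" else "NO" := by
  cases f with
  | zero =>
    have hl : l = [] := List.eq_nil_of_length_eq_zero (by omega)
    subst hl
    simp [is_patF, hasSplit]
  | succ f =>
    simp only [is_patF]
    by_cases h1 : l.length = 1
    · simp [h1]
    · simp only [h1, if_false, false_or]
      show (if (PySem.List.pyRange 0 l.length 1).any (fun i => bodyAF f l i) then "YES" else "NO") = _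
      have hA : ((PySem.List.pyRange 0 l.length 1).any (fun i => bodyAF f l i)) = hasSplit l := by
        rw [Bool.eq_iff_iff]
        constructor
        · intro h
          obtain ⟨i, hi, hb⟩ := List.any_eq_true.1 h
          have hm := PySem.List.mem_pyRange_one.1 hi
          have hb' : bodyAF f l i = true := hb
          rw [bodyAF_eq f l i hm.1 hm.2] at hb'
          exact List.any_eq_true.2 ⟨i.toNat, List.mem_range.2 (by omega), hb'⟩
        · intro h
          obtain ⟨k, hk, hq⟩ := List.any_eq_true.1 h
          have hkn := List.mem_range.1 hk
          refine List.any_eq_true.2 ⟨(k : Int), PySem.List.mem_pyRange_one.2 ⟨by omega, by omega⟩, ?_⟩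
          show bodyAF f l (k : Int) = true
          rw [bodyAF_eq f l (k : Int) (by omega) (by omega)]
          simpa using hq
      rw [hA]

theorem is_pat_eq_ite (l : List Int) :
    is_pat l = if (l.length = 1 ∨ hasSplit l = true) then "YES" else "NO" :=
  is_patF_eq_ite l.length l (le_refl _)

-- ---- B-side characterization ----
lemma scanLoop_iff (pairs : List (Int × Int)) : ∀ pm : Int,
    scanLoop pm pairs = true ↔
      ∃ j, ∃ h : j < pairs.length, ((pairs.take j).map Prod.fst).foldl min pm > pairs[j].2 := by
  induction pairs with
  | nil => intro pm; simp [scanLoop]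
  | cons p ps ih =>
    intro pm
    obtain ⟨x, s⟩ := p
    simp only [scanLoop]
    by_cases hps : pm > s
    · simp only [hps, if_true, true_iff]
      exact ⟨0, by simp, by simpa using hps⟩
    · simp only [hps, if_false, if_lt_eq_min, ih]
      constructor
      · rintro ⟨j, hj, hcond⟩
        refine ⟨j + 1, by simpa using Nat.succ_lt_succ hj, ?_⟩
        simpa using hcond
      · rintro ⟨j, hj, hcond⟩
        cases j with
        | zero => simp at hcond; omega
        | succ j =>
          refine ⟨j, by simpa using Nat.lt_of_succ_lt_succ hj, ?_⟩
          simpa using hcond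

lemma alt_scan_eq (a : Int) (t : List Int) :
    scanLoop a (t.zip (((smLoop (PySem.List.pyGetD (a :: t) (-1) 0) (a :: t).reverse).reverse).drop 1))
      = hasSplit (a :: t) := by
  set l := a :: t with hl
  set suf := (smLoop (PySem.List.pyGetD l (-1) 0) l.reverse).reverse with hsuf
  have hsl : suf.length = l.length := by
    rw [hsuf, List.length_reverse, length_smLoop, List.length_reverse]
  have hlen : l.length = t.length + 1 := by simp [hl]
  have hzlen : (t.zip (suf.drop 1)).length = t.length := by
    simp [List.length_zip, hsl, hlen]
  rw [Bool.eq_iff_iff]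
  rw [scanLoop_iff]
  constructor
  · rintro ⟨j, hj, hcond⟩
    rw [hzlen] at hj
    -- the condition at j corresponds to split position k = j+1
    have hk2 : j + 1 < l.length := by omega
    obtain ⟨-, ⟨b, bs, hdk⟩⟩ := take_drop_cons l (j + 1) (by omega) hk2
    -- take (j+1) of a::t is a :: t.take j
    have htk' : l.take (j + 1) = a :: t.take j := by simp [hl]
    -- evaluate the pieces of hcond
    have hfst : ((t.zip (suf.drop 1)).take j).map Prod.fst = t.take j := by
      rw [List.zip_eq_zipWith, List.take_zipWith, ← List.zip_eq_zipWith]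
      apply List.map_fst_zip
      simp [hsl, hlen]
    have h1j : 1 + j < suf.length := by rw [hsl, hlen]; omega
    have hsnd : (t.zip (suf.drop 1))[j].2 = bs.foldl max b := by
      have hj2 : j < (suf.drop 1).length := by simp [hsl, hlen]; omega
      rw [List.getElem_zip]
      show (suf.drop 1)[j] = _
      have hx : (suf.drop 1)[j]'hj2 = suf.getD (1 + j) 0 := by
        rw [List.getElem_drop, List.getD_eq_getElem suf (0:Int) h1j]
      rw [hx, Nat.add_comm 1 j]
      exact sm_at l (j + 1) hk2 b bs hdk
    rw [hfst, hsnd] at hcond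
    refine List.any_eq_true.2 ⟨j + 1, List.mem_range.2 (by omega), ?_⟩
    unfold splitCond
    rw [htk', hdk]
    simpa using hcond
  · intro h
    obtain ⟨k, hk, hq⟩ := List.any_eq_true.1 h
    have hkn := List.mem_range.1 hk
    have hk0 : 0 < k := by
      by_contra hc
      have : k = 0 := by omega
      rw [this] at hq
      unfold splitCond at hq
      simp at hq
    obtain ⟨j, rfl⟩ : ∃ j, k = j + 1 := ⟨k - 1, by omega⟩
    obtain ⟨-, ⟨b, bs, hdk⟩⟩ := take_drop_cons l (j + 1) (by omega) (by omega)
    unfold splitCond at hq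
    have htk' : l.take (j + 1) = a :: t.take j := by simp [hl]
    rw [htk', hdk] at hq
    refine ⟨j, by rw [hzlen]; omega, ?_⟩
    have hfst : ((t.zip (suf.drop 1)).take j).map Prod.fst = t.take j := by
      rw [List.zip_eq_zipWith, List.take_zipWith, ← List.zip_eq_zipWith]
      apply List.map_fst_zip
      simp [hsl, hlen]
    have h1j : 1 + j < suf.length := by rw [hsl, hlen]; omega
    have hsnd : ((t.zip (suf.drop 1))[j]'(by rw [hzlen]; omega)).2 = bs.foldl max b := by
      have hj2 : j < (suf.drop 1).length := by simp [hsl, hlen]; omega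
      rw [List.getElem_zip]
      show (suf.drop 1)[j]'hj2 = _
      have hx : (suf.drop 1)[j]'hj2 = suf.getD (1 + j) 0 := by
        rw [List.getElem_drop, List.getD_eq_getElem suf (0:Int) h1j]
      rw [hx, Nat.add_comm 1 j]
      exact sm_at l (j + 1) (by omega) b bs hdk
    rw [hfst, hsnd]
    simpa using hq

theorem is_pat_alt_eq_ite (l : List Int) :
    is_pat_alt l = if (l.length = 1 ∨ hasSplit l = true) then "YES" else "NO" := by
  unfold is_pat_alt
  by_cases h1 : l.length = 1
  · simp [h1]
  · simp only [h1, if_false, false_or]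
    by_cases h0 : l.length = 0
    · have : l = [] := List.eq_nil_of_length_eq_zero h0
      subst this
      simp [hasSplit]
    · simp only [h0, if_false]
      cases l with
      | nil => simp at h0
      | cons a t =>
        have hs1 : PySem.List.slice (a :: t) (some 1) none = t :=
          PySem.List.slice_from_one (a :: t)
        have hs2 : ∀ suf : List Int, PySem.List.slice suf (some 1) none = suf.drop 1 := by
          intro suf
          rw [PySem.List.slice_from_one, List.drop_one]
        rw [show PySem.List.pyGetD (a :: t) 0 0 = a from PySem.List.pyGetD_zero_cons a t 0]
        rw [hs1, hs2, alt_scan_eq a t]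

-- ===== VERDICT (by name: the statement is the Claim_ definition above) =====
theorem is_pat_spec : Claim_equal_is_pat := by
  intro l _
  show is_pat l = is_pat_alt l
  rw [is_pat_eq_ite, is_pat_alt_eq_ite]
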